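-- pv_equiv track=rewrite | github.com/mortyc126-debug/SHA | step22_fiber_description.py | approach_C_recurrence
-- ===== SOURCE A (Python) =====
-- N = 4
--
-- MASK = (1 << N) - 1
--
-- N_MSG = 4
--
-- N_INPUT = N * N_MSG
--
-- N_TOTAL = 1 << N_INPUT
--
-- def approach_C_recurrence(fiber):
--     """Check if fiber elements follow a recurrence: f[i+1] = g(f[i])."""
--     if len(fiber) < 3:
--         return None, 0
--
--     # Sort fiber and look for patterns
--     fiber_set = set(fiber)
--
--     best_g = None
--     best_count = 0
--
--     # Try simple recurrences: f[i+1] = f[i] XOR c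
--     for c in range(1, N_TOTAL):
--         chain_len = 0
--         current = fiber[0]
--         while current in fiber_set and chain_len < len(fiber):
--             chain_len += 1
--             current = current ^ c
--         if chain_len > best_count:
--             best_count = chain_len
--             best_g = ('xor', c)
--
--     # Try: f[i+1] = word_add(f[i], c)
--     for c in range(1, min(N_TOTAL, 1000)):
--         chain_len = 0
--         current = fiber[0]
--         while current in fiber_set and chain_len < len(fiber):
--             chain_len += 1
--             result = 0
--             for w in range(N_MSG):
--                 result |= (((current >> (w*N)) & MASK) + ((c >> (w*N)) & MASK)) & MASK << (w*N)
--             current = result & (N_TOTAL - 1)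
--         if chain_len > best_count:
--             best_count = chain_len
--             best_g = ('add', c)
--
--     # Try: f[i+1] = ROTR(f[i], s)  (word-level rotation of entire delta)
--     for s in range(1, N_INPUT):
--         chain_len = 0
--         current = fiber[0]
--         visited = set()
--         while current in fiber_set and current not in visited and chain_len < len(fiber):
--             visited.add(current)
--             chain_len += 1
--             current = ((current >> s) | (current << (N_INPUT - s))) & (N_TOTAL - 1)
--         if chain_len > best_count:
--             best_count = chain_len
--             best_g = ('rotr', s)
--
--     return best_g, best_count
-- ===== SOURCE B (Python) =====
-- def _chain_len(start, fs, cap, step, use_visited):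
--     cur, k = start, 0
--     seen = set()
--     while cur in fs and k < cap and (cur not in seen if use_visited else True):
--         if use_visited:
--             seen.add(cur)
--         k += 1
--         cur = step(cur)
--     return k
--
--
-- def _word_add(current, c):
--     result = 0
--     for w in range(4):
--         result |= (((current >> (w * 4)) & 15) + ((c >> (w * 4)) & 15)) & (15 << (w * 4))
--     return result & 0xFFFF
--
--
-- def approach_C_recurrence(fiber):
--     """XOR chains alternate with period 2, so the 65535-step XOR scan of A
--     collapses to one pass over the fiber elements; add/rotr blocks only matter
--     when no XOR constant links fiber[0] to another element."""
--     if len(fiber) < 3: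
--         return None, 0
--     n = len(fiber)
--     fs = set(fiber)
--     f0 = fiber[0]
--     cands = [f0 ^ y for y in fs if 1 <= (f0 ^ y) <= 0xFFFF]
--     if cands:
--         return ('xor', min(cands)), n
--     best_g, best_count = ('xor', 1), 1
--     for c in range(1, 1000):
--         k = _chain_len(f0, fs, n, lambda cur: _word_add(cur, c), False)
--         if k > best_count:
--             best_g, best_count = ('add', c), k
--     for s in range(1, 16):
--         k = _chain_len(f0, fs, n, lambda cur: ((cur >> s) | (cur << (16 - s))) & 0xFFFF, True)
--         if k > best_count:
--             best_g, best_count = ('rotr', s), k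
--     return best_g, best_count
-- ===== Notes on version B (the rewrite author's own statement) =====
-- stated objective: faster
-- what changed: A's 65535-iteration XOR-constant scan (each iteration simulating a chain) is replaced by a single pass over the fiber elements: an XOR chain alternates with period 2, so its length is the full fiber length iff the first element XOR c lies in the set, and the best constant is the minimum of first-element XOR y over qualifying elements y; when such a constant exists B returns immediately, skipping the add/rotr scans, which can never beat a full-length chain.
import Mathlib
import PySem

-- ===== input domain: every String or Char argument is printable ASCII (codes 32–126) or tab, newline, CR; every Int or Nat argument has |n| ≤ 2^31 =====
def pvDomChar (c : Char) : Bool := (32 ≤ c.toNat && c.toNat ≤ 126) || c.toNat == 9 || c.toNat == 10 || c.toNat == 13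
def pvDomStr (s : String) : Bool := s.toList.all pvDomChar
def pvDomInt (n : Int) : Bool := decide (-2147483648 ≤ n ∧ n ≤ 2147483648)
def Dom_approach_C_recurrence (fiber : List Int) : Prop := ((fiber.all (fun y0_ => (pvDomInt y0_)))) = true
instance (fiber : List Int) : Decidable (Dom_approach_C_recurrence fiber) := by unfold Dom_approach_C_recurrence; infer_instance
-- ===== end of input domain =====

-- B replaces A's 65535-iteration XOR-constant scan by a single pass over the fiber
-- (an XOR chain alternates with period 2, so its length is decided by one set lookup)
-- and returns early when an XOR constant is found; objective: faster (constant factor).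

-- ===== PORT A =====
-- A's while loops are ported with fuel = len(fiber) - chain_len; the loop guard
-- 'chain_len < len(fiber)' makes this exact (fuel = 0 ↔ the guard is false).
def pvA_xorLoop (fs : PySem.Set Int) (c : Int) : Nat → Int → Nat → Nat
  | 0, _, k => k
  | fuel+1, cur, k =>
    if PySem.Set.contains fs cur then pvA_xorLoop fs c fuel (PySem.Int.bxor cur c) (k+1) else k

def pvA_addStep (cur c : Int) : Int :=
  let result := (PySem.List.pyRange 0 4 1).foldl (fun r w =>
    PySem.Int.bor r (PySem.Int.band
      ((PySem.Int.band (cur >>> (w * 4).toNat) 15) + (PySem.Int.band (c >>> (w * 4).toNat) 15))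
      (15 <<< (w * 4).toNat))) 0
  PySem.Int.band result 65535

def pvA_addLoop (fs : PySem.Set Int) (c : Int) : Nat → Int → Nat → Nat
  | 0, _, k => k
  | fuel+1, cur, k =>
    if PySem.Set.contains fs cur then pvA_addLoop fs c fuel (pvA_addStep cur c) (k+1) else k

def pvA_rotrStep (s cur : Int) : Int :=
  PySem.Int.band (PySem.Int.bor (cur >>> s.toNat) (cur <<< (16 - s).toNat)) 65535

def pvA_rotrLoop (fs : PySem.Set Int) (s : Int) : Nat → Int → PySem.Set Int → Nat → Nat
  | 0, _, _, k => k
  | fuel+1, cur, vis, k =>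
    if PySem.Set.contains fs cur && !(PySem.Set.contains vis cur) then
      pvA_rotrLoop fs s fuel (pvA_rotrStep s cur) (PySem.Set.add vis cur) (k+1)
    else k

def approach_C_recurrence (fiber : List Int) : (Option (String × Int)) × Int :=
  if fiber.length < 3 then (none, 0)
  else
    let fs : PySem.Set Int := PySem.Set.ofList fiber
    let f0 := fiber.headI          -- fiber[0]; fiber is nonempty here
    let st1 := (PySem.List.pyRange 1 65536 1).foldl (fun st c =>
      let L := pvA_xorLoop fs c fiber.length f0 0
      if L > st.2 then (some (("xor", c)), L) else st) ((none : Option (String × Int)), 0)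
    let st2 := (PySem.List.pyRange 1 1000 1).foldl (fun st c =>
      let L := pvA_addLoop fs c fiber.length f0 0
      if L > st.2 then (some (("add", c)), L) else st) st1
    let st3 := (PySem.List.pyRange 1 16 1).foldl (fun st s =>
      let L := pvA_rotrLoop fs s fiber.length f0 PySem.Set.empty 0
      if L > st.2 then (some (("rotr", s)), L) else st) st2
    (st3.1, (st3.2 : Int))

-- ===== PORT B =====
def pvB_wordAdd (cur c : Int) : Int :=
  let result := (PySem.List.pyRange 0 4 1).foldl (fun r w =>
    PySem.Int.bor r (PySem.Int.band
      ((PySem.Int.band (cur >>> (w * 4).toNat) 15) + (PySem.Int.band (c >>> (w * 4).toNat) 15))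
      (15 <<< (w * 4).toNat))) 0
  PySem.Int.band result 65535

def pvB_rotrStep (s cur : Int) : Int :=
  PySem.Int.band (PySem.Int.bor (cur >>> s.toNat) (cur <<< (16 - s).toNat)) 65535

def pvB_chainLen (fs : PySem.Set Int) (step : Int → Int) (useVisited : Bool) :
    Nat → Int → PySem.Set Int → Nat → Nat
  | 0, _, _, k => k
  | fuel+1, cur, seen, k =>
    if PySem.Set.contains fs cur && (if useVisited then !(PySem.Set.contains seen cur) else true) then
      pvB_chainLen fs step useVisited fuel (step cur)
        (if useVisited then PySem.Set.add seen cur else seen) (k+1)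
    else k

def approach_C_recurrence_alt (fiber : List Int) : (Option (String × Int)) × Int :=
  if fiber.length < 3 then (none, 0)
  else
    let n := fiber.length
    let fs : PySem.Set Int := PySem.Set.ofList fiber
    let f0 := fiber.headI
    -- candidates min(...) is insensitive to the set's iteration order
    let cands := (fs.filter (fun y =>
      decide (1 ≤ PySem.Int.bxor f0 y) && decide (PySem.Int.bxor f0 y ≤ 65535))).map
      (fun y => PySem.Int.bxor f0 y)
    match PySem.List.min? cands (fun x => x) with
    | some m => (some (("xor", m)), (n : Int))
    | none =>
      let st1 := (PySem.List.pyRange 1 1000 1).foldl (fun st c =>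
        let L := pvB_chainLen fs (fun cur => pvB_wordAdd cur c) false n f0 PySem.Set.empty 0
        if L > st.2 then (some (("add", c)), L) else st) ((some (("xor", (1 : Int)))), 1)
      let st2 := (PySem.List.pyRange 1 16 1).foldl (fun st s =>
        let L := pvB_chainLen fs (fun cur => pvB_rotrStep s cur) true n f0 PySem.Set.empty 0
        if L > st.2 then (some (("rotr", s)), L) else st) st1
      (st2.1, (st2.2 : Int))

-- ===== PRECONDITION & SPEC =====
def Spec_approach_C_recurrence (fiber : List Int) (out : (Option (String × Int)) × Int) : Prop := out = approach_C_recurrence_alt fiber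
instance (fiber : List Int) (out : (Option (String × Int)) × Int) : Decidable (Spec_approach_C_recurrence fiber out) := by unfold Spec_approach_C_recurrence; infer_instance

-- ===== CLAIM (what is proved, stated in full; the proofs are below) =====
def Claim_equal_approach_C_recurrence : Prop := ∀ (fiber : List Int), Dom_approach_C_recurrence fiber → Spec_approach_C_recurrence fiber (approach_C_recurrence fiber)

-- ===== LEMMAS AND PROOFS =====

theorem pvBxorCancel (a c : Int) : PySem.Int.bxor (PySem.Int.bxor a c) c = a := by
  unfold PySem.Int.bxor
  by_cases ha : 0 ≤ a <;> by_cases hc : 0 ≤ c <;>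
    simp only [ha, hc, if_false, if_pos] <;> split_ifs <;>
    simp_all <;> omega

theorem pvContains (s : PySem.Set Int) (x : Int) : PySem.Set.contains s x = true ↔ x ∈ s := by
  simp [PySem.Set.contains]

theorem pvXorLoop_le (fs : PySem.Set Int) (c : Int) :
    ∀ (fuel : Nat) (cur : Int) (k : Nat), pvA_xorLoop fs c fuel cur k ≤ k + fuel := by
  intro fuel
  induction fuel with
  | zero => intro cur k; simp [pvA_xorLoop]
  | succ m ih =>
    intro cur k
    simp only [pvA_xorLoop]
    split
    · exact le_trans (ih _ _) (by omega)
    · omega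

theorem pvAddLoop_le (fs : PySem.Set Int) (c : Int) :
    ∀ (fuel : Nat) (cur : Int) (k : Nat), pvA_addLoop fs c fuel cur k ≤ k + fuel := by
  intro fuel
  induction fuel with
  | zero => intro cur k; simp [pvA_addLoop]
  | succ m ih =>
    intro cur k
    simp only [pvA_addLoop]
    split
    · exact le_trans (ih _ _) (by omega)
    · omega

theorem pvRotrLoop_le (fs : PySem.Set Int) (s : Int) :
    ∀ (fuel : Nat) (cur : Int) (vis : PySem.Set Int) (k : Nat),
      pvA_rotrLoop fs s fuel cur vis k ≤ k + fuel := by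
  intro fuel
  induction fuel with
  | zero => intro cur vis k; simp [pvA_rotrLoop]
  | succ m ih =>
    intro cur vis k
    simp only [pvA_rotrLoop]
    split
    · exact le_trans (ih _ _ _) (by omega)
    · omega

theorem pvXorLoop_full (fs : PySem.Set Int) (c : Int) :
    ∀ (fuel : Nat) (cur : Int) (k : Nat),
      PySem.Set.contains fs cur = true → PySem.Set.contains fs (PySem.Int.bxor cur c) = true →
      pvA_xorLoop fs c fuel cur k = k + fuel := by
  intro fuel
  induction fuel with
  | zero => intro cur k _ _; simp [pvA_xorLoop]
  | succ m ih =>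
    intro cur k h1 h2
    simp only [pvA_xorLoop, h1, if_true]
    rw [ih (PySem.Int.bxor cur c) (k+1) h2 (by rw [pvBxorCancel]; exact h1)]
    omega

theorem pvXorLoop_stop (fs : PySem.Set Int) (c : Int) (fuel : Nat) (cur : Int) (k : Nat)
    (h : PySem.Set.contains fs cur = false) : pvA_xorLoop fs c fuel cur k = k := by
  cases fuel with
  | zero => rfl
  | succ m => simp only [pvA_xorLoop, h, Bool.false_eq_true, if_false]

theorem pvXorLoop_char_pos (fs : PySem.Set Int) (c f0 : Int) (n : Nat)
    (hf0 : PySem.Set.contains fs f0 = true)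
    (h : PySem.Set.contains fs (PySem.Int.bxor f0 c) = true) :
    pvA_xorLoop fs c n f0 0 = n := by
  rw [pvXorLoop_full fs c n f0 0 hf0 h]; omega

theorem pvXorLoop_char_neg (fs : PySem.Set Int) (c f0 : Int) (n : Nat)
    (hf0 : PySem.Set.contains fs f0 = true) (hn : 1 ≤ n)
    (h : PySem.Set.contains fs (PySem.Int.bxor f0 c) = false) :
    pvA_xorLoop fs c n f0 0 = 1 := by
  obtain ⟨m, rfl⟩ : ∃ m, n = m + 1 := ⟨n - 1, by omega⟩
  simp only [pvA_xorLoop, hf0, if_true]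
  exact pvXorLoop_stop fs c m _ 1 h

theorem pvXorLoop_le_n (fs : PySem.Set Int) (c f0 : Int) (n : Nat) :
    pvA_xorLoop fs c n f0 0 ≤ n := by
  simpa using pvXorLoop_le fs c n f0 0

theorem pvFold_absorb (lbl : String) (L : Int → Nat) :
    ∀ (cs : List Int) (st : (Option (String × Int)) × Nat),
      (∀ c ∈ cs, L c ≤ st.2) →
      cs.foldl (fun st c => if L c > st.2 then (some ((lbl, c)), L c) else st) st = st := by
  intro cs
  induction cs with
  | nil => intro st _; rfl
  | cons c t ih =>
    intro st h
    simp only [List.foldl_cons]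
    rw [if_neg (by have := h c (by simp); omega)]
    exact ih st (fun c' hc' => h c' (by simp [hc']))

theorem pvFindMin {p : Int → Bool} :
    ∀ (l : List Int), l.Pairwise (· < ·) → ∀ (c : Int), l.find? p = some c →
      ∀ x ∈ l, p x = true → c ≤ x := by
  intro l
  induction l with
  | nil => intro _ c h; simp at h
  | cons a t ih =>
    intro hp c hfind x hx hpx
    rcases List.pairwise_cons.mp hp with ⟨ha, ht⟩
    by_cases hpa : p a = true
    · rw [List.find?_cons_of_pos hpa] at hfind
      obtain rfl : a = c := by injection hfind
      rcases hx with _ | hx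
      · exact le_refl _
      · exact le_of_lt (ha x (by assumption))
    · rw [List.find?_cons_of_neg (by simpa using hpa)] at hfind
      rcases hx with _ | hx
      · exact absurd hpx hpa
      · exact ih ht c hfind x (by assumption) hpx

-- members of B's candidate list are exactly the XOR constants A's scan tests positively
theorem pvMemCands (fs : PySem.Set Int) (f0 m : Int) :
    m ∈ ((fs.filter (fun y =>
        decide (1 ≤ PySem.Int.bxor f0 y) && decide (PySem.Int.bxor f0 y ≤ 65535))).map
        (fun y => PySem.Int.bxor f0 y)) ↔
      (1 ≤ m ∧ m ≤ 65535 ∧ PySem.Set.contains fs (PySem.Int.bxor f0 m) = true) := by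
  have hinv : ∀ y : Int, PySem.Int.bxor f0 (PySem.Int.bxor f0 y) = y := by
    intro y
    rw [PySem.Int.bxor_comm f0 (PySem.Int.bxor f0 y), PySem.Int.bxor_comm f0 y, pvBxorCancel]
  constructor
  · rintro hm
    rcases List.mem_map.mp hm with ⟨y, hy, rfl⟩
    rcases List.mem_filter.mp hy with ⟨hymem, hcond⟩
    simp only [Bool.and_eq_true, decide_eq_true_eq] at hcond
    refine ⟨hcond.1, hcond.2, ?_⟩
    rw [hinv y]
    exact (pvContains fs y).mpr hymem
  · rintro ⟨h1, h2, h3⟩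
    refine List.mem_map.mpr ⟨PySem.Int.bxor f0 m, List.mem_filter.mpr ⟨(pvContains _ _).mp h3, ?_⟩, hinv m⟩
    simp only [Bool.and_eq_true, decide_eq_true_eq]
    rw [hinv m]
    exact ⟨h1, h2⟩

-- A's first-hit scan over range(1, 65536) finds exactly min(B's candidate list)
theorem pvFindEqMin (fs : PySem.Set Int) (f0 : Int) :
    (PySem.List.pyRange 1 65536 1).find? (fun c => PySem.Set.contains fs (PySem.Int.bxor f0 c))
    = PySem.List.min? ((fs.filter (fun y =>
        decide (1 ≤ PySem.Int.bxor f0 y) && decide (PySem.Int.bxor f0 y ≤ 65535))).map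
        (fun y => PySem.Int.bxor f0 y)) (fun x => x) := by
  set p : Int → Bool := fun c => PySem.Set.contains fs (PySem.Int.bxor f0 c) with hp
  set cands := ((fs.filter (fun y =>
      decide (1 ≤ PySem.Int.bxor f0 y) && decide (PySem.Int.bxor f0 y ≤ 65535))).map
      (fun y => PySem.Int.bxor f0 y)) with hcands
  cases hf : (PySem.List.pyRange 1 65536 1).find? p with
  | none =>
    have hnone := List.find?_eq_none.mp hf
    cases hm : PySem.List.min? cands (fun x => x) with
    | none => rfl
    | some m =>
      have hmem := PySem.List.min?_mem hm
      rcases (pvMemCands fs f0 m).mp hmem with ⟨h1, h2, h3⟩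
      have h4 : p m = true := h3
      have h5 := hnone m (PySem.List.mem_pyRange_one.mpr ⟨h1, by omega⟩)
      rw [h4] at h5
      exact absurd rfl h5
  | some c =>
    have hpc : p c = true := List.find?_some hf
    have hcmem : c ∈ PySem.List.pyRange 1 65536 1 := List.mem_of_find?_eq_some hf
    rcases PySem.List.mem_pyRange_one.mp hcmem with ⟨hc1, hc2⟩
    have hccand : c ∈ cands := (pvMemCands fs f0 c).mpr ⟨hc1, by omega, hpc⟩
    cases hm : PySem.List.min? cands (fun x => x) with
    | none =>
      rw [PySem.List.min?_eq_none_iff] at hm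
      simp [hm] at hccand
    | some m =>
      have hmem := PySem.List.min?_mem hm
      have hmin := PySem.List.min?_isMin hm
      rcases (pvMemCands fs f0 m).mp hmem with ⟨h1, h2, h3⟩
      have hcm : c ≤ m :=
        pvFindMin (PySem.List.pyRange 1 65536 1) (PySem.List.pairwise_lt_pyRange_one 1 65536)
          c hf m (PySem.List.mem_pyRange_one.mpr ⟨h1, by omega⟩) h3
      have hmc : m ≤ c := hmin c hccand
      rw [le_antisymm hcm hmc]

-- characterization of A's whole XOR fold
theorem pvXorFold_rest (fs : PySem.Set Int) (f0 : Int) (n : Nat)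
    (hf0 : PySem.Set.contains fs f0 = true) (hn : 2 ≤ n) :
    ∀ (cs : List Int) (x1 : Int),
      cs.foldl (fun st c =>
          if pvA_xorLoop fs c n f0 0 > st.2 then (some (("xor", c)), pvA_xorLoop fs c n f0 0) else st)
        ((some (("xor", x1))), 1)
      = match cs.find? (fun c => PySem.Set.contains fs (PySem.Int.bxor f0 c)) with
        | some c => ((some (("xor", c))), n)
        | none => ((some (("xor", x1))), 1) := by
  intro cs
  induction cs with
  | nil => intro x1; rfl
  | cons c t ih =>
    intro x1
    simp only [List.foldl_cons]
    cases h : PySem.Set.contains fs (PySem.Int.bxor f0 c) with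
    | true =>
      rw [pvXorLoop_char_pos fs c f0 n hf0 h]
      rw [if_pos (by omega : n > 1)]
      rw [List.find?_cons_of_pos (by simpa using h)]
      exact pvFold_absorb "xor" _ t _ (fun c' _ => pvXorLoop_le_n fs c' f0 n)
    | false =>
      rw [pvXorLoop_char_neg fs c f0 n hf0 (by omega) h]
      rw [if_neg (by omega)]
      rw [List.find?_cons_of_neg (by simpa using h)]
      exact ih x1

theorem pvXorFold_cons (fs : PySem.Set Int) (f0 : Int) (n : Nat)
    (hf0 : PySem.Set.contains fs f0 = true) (hn : 2 ≤ n) (c : Int) (t : List Int) :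
    (c :: t).foldl (fun st c =>
        if pvA_xorLoop fs c n f0 0 > st.2 then (some (("xor", c)), pvA_xorLoop fs c n f0 0) else st)
      ((none : Option (String × Int)), 0)
    = match (c :: t).find? (fun c => PySem.Set.contains fs (PySem.Int.bxor f0 c)) with
      | some c' => ((some (("xor", c'))), n)
      | none => ((some (("xor", c))), 1) := by
  rw [List.foldl_cons]
  cases h : PySem.Set.contains fs (PySem.Int.bxor f0 c) with
  | true =>
    rw [List.find?_cons_of_pos (by simpa using h)]
    show t.foldl _ (if pvA_xorLoop fs c n f0 0 > 0 then _ else _) = _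
    rw [pvXorLoop_char_pos fs c f0 n hf0 h]
    rw [if_pos (by omega : n > 0)]
    exact pvFold_absorb "xor" _ _ _ (fun c' _ => pvXorLoop_le_n fs c' f0 n)
  | false =>
    rw [List.find?_cons_of_neg (by simpa using h)]
    show t.foldl _ (if pvA_xorLoop fs c n f0 0 > 0 then _ else _) = _
    rw [pvXorLoop_char_neg fs c f0 n hf0 (by omega) h]
    rw [if_pos (by omega : 1 > 0)]
    exact pvXorFold_rest fs f0 n hf0 hn t c

theorem pvAddLoopEq (fs : PySem.Set Int) (c : Int) :
    ∀ (fuel : Nat) (cur : Int) (seen : PySem.Set Int) (k : Nat),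
      pvB_chainLen fs (fun cur => pvB_wordAdd cur c) false fuel cur seen k
      = pvA_addLoop fs c fuel cur k := by
  intro fuel
  induction fuel with
  | zero => intro cur seen k; rfl
  | succ m ih =>
    intro cur seen k
    simp only [pvB_chainLen, pvA_addLoop, Bool.false_eq_true, if_false, Bool.and_true]
    by_cases hc : PySem.Set.contains fs cur = true
    · rw [if_pos hc, if_pos hc]
      exact ih _ _ _
    · rw [if_neg hc, if_neg hc]

theorem pvRotrLoopEq (fs : PySem.Set Int) (s : Int) :
    ∀ (fuel : Nat) (cur : Int) (vis : PySem.Set Int) (k : Nat),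
      pvB_chainLen fs (fun cur => pvB_rotrStep s cur) true fuel cur vis k
      = pvA_rotrLoop fs s fuel cur vis k := by
  intro fuel
  induction fuel with
  | zero => intro cur vis k; rfl
  | succ m ih =>
    intro cur vis k
    simp only [pvB_chainLen, pvA_rotrLoop, if_true]
    by_cases hc : (PySem.Set.contains fs cur && !(PySem.Set.contains vis cur)) = true
    · rw [if_pos hc, if_pos hc]
      exact ih _ _ _
    · rw [if_neg hc, if_neg hc]

-- ===== VERDICT (by name: the statement is the Claim_ definition above) =====
theorem pvHeadIMem (l : List Int) (h : l ≠ []) : l.headI ∈ l := by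
  cases l with
  | nil => exact absurd rfl h
  | cons a t => exact List.mem_cons_self

theorem approach_C_recurrence_spec : Claim_equal_approach_C_recurrence := by
  intro fiber _hdom
  unfold Spec_approach_C_recurrence approach_C_recurrence approach_C_recurrence_alt
  by_cases hlen : fiber.length < 3
  · simp [hlen]
  · rw [if_neg hlen, if_neg hlen]
    have hne : fiber ≠ [] := by intro h; rw [h] at hlen; simp at hlen
    have hf0 : PySem.Set.contains (PySem.Set.ofList fiber) fiber.headI = true :=
      (pvContains _ _).mpr ((PySem.Set.mem_ofList _ _).mpr (pvHeadIMem fiber hne))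
    have hn : 2 ≤ fiber.length := by omega
    have hsplit : PySem.List.pyRange 1 65536 1 = 1 :: PySem.List.pyRange 2 65536 1 := by
      rw [PySem.List.pyRange_one_cons (by norm_num : (1:Int) < 65536)]; norm_num
    simp only []
    rw [hsplit, pvXorFold_cons (PySem.Set.ofList fiber) fiber.headI fiber.length hf0 hn, ← hsplit]
    rw [pvFindEqMin (PySem.Set.ofList fiber) fiber.headI]
    cases hm : PySem.List.min? ((( PySem.Set.ofList fiber).filter (fun y =>
        decide (1 ≤ PySem.Int.bxor fiber.headI y) && decide (PySem.Int.bxor fiber.headI y ≤ 65535))).map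
        (fun y => PySem.Int.bxor fiber.headI y)) (fun x => x) with
    | some c =>
      -- XOR chain of full length found: A's add/rotr folds cannot improve on n
      rw [pvFold_absorb "add" _ _ _ (fun c' _ => by
        simpa using pvAddLoop_le (PySem.Set.ofList fiber) c' fiber.length fiber.headI 0)]
      rw [pvFold_absorb "rotr" _ _ _ (fun s' _ => by
        simpa using pvRotrLoop_le (PySem.Set.ofList fiber) s' fiber.length fiber.headI PySem.Set.empty 0)]
    | none =>
      -- no XOR constant: both sides run the same add/rotr folds from (('xor',1),1)
      have hadd : (fun (st : (Option (String × Int)) × Nat) (c : Int) =>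
          if pvA_addLoop (PySem.Set.ofList fiber) c fiber.length fiber.headI 0 > st.2
          then (some (("add", c)), pvA_addLoop (PySem.Set.ofList fiber) c fiber.length fiber.headI 0) else st)
        = (fun (st : (Option (String × Int)) × Nat) (c : Int) =>
          if pvB_chainLen (PySem.Set.ofList fiber) (fun cur => pvB_wordAdd cur c) false
              fiber.length fiber.headI PySem.Set.empty 0 > st.2
          then (some (("add", c)), pvB_chainLen (PySem.Set.ofList fiber) (fun cur => pvB_wordAdd cur c) false
              fiber.length fiber.headI PySem.Set.empty 0) else st) := by
        funext st c; rw [pvAddLoopEq]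
      have hrotr : (fun (st : (Option (String × Int)) × Nat) (s : Int) =>
          if pvA_rotrLoop (PySem.Set.ofList fiber) s fiber.length fiber.headI PySem.Set.empty 0 > st.2
          then (some (("rotr", s)), pvA_rotrLoop (PySem.Set.ofList fiber) s fiber.length fiber.headI PySem.Set.empty 0) else st)
        = (fun (st : (Option (String × Int)) × Nat) (s : Int) =>
          if pvB_chainLen (PySem.Set.ofList fiber) (fun cur => pvB_rotrStep s cur)
              true fiber.length fiber.headI PySem.Set.empty 0 > st.2
          then (some (("rotr", s)), pvB_chainLen (PySem.Set.ofList fiber) (fun cur => pvB_rotrStep s cur)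
              true fiber.length fiber.headI PySem.Set.empty 0) else st) := by
        funext st s; rw [pvRotrLoopEq]
      rw [hadd, hrotr]
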